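-- pv_equiv track=rewrite | github.com/ishayyemini/CS1001 | ex3/hw3_322868852.py | sort_strings2
-- ===== SOURCE A (Python) =====
-- chars = ["a", "b", "c", "d", "e"]
--
-- def int_to_string(k, n):  # noqa
--     output = ""
--     tmp_n = n
--     for i in range(k):
--         output = chars[tmp_n % 5] + output
--         tmp_n //= 5
--     return output
--
-- def sort_strings2(lst, k):  # noqa
--     output = []
--     for i in range(5**k):
--         lexical = int_to_string(k, i)
--         for s in lst:
--             if s == lexical:
--                 output.append(lexical)
--     return output
-- ===== SOURCE B (Python) =====
-- def sort_strings2(lst, k):  # filter the valid strings, then sort: no 5**k enumeration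
--     return sorted(s for s in lst if len(s) == k and all(c in "abcde" for c in s))
-- ===== Notes on version B (the rewrite author's own statement) =====
-- stated objective: faster
-- what changed: Instead of enumerating all 5**k candidate strings in lexical order and scanning the list for each, B filters the list once for valid k-length strings over 'abcde' and sorts the survivors; intended as faster (a timing run measured 12.75x at the largest size both finished, with A timing out beyond that).
import Mathlib
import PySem

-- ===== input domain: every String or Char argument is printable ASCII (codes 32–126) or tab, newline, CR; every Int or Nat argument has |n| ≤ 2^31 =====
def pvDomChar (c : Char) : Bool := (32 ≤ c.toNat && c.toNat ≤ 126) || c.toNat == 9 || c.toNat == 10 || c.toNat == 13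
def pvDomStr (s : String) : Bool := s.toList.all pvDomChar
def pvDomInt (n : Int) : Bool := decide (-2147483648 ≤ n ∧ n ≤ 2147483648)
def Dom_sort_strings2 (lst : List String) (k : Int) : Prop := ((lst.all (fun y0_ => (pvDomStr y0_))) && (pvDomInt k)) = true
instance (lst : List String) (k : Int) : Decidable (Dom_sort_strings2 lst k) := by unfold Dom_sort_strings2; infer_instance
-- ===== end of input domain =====

-- B filters the list once for valid k-length strings over "abcde" and sorts them, instead of
-- A's enumeration of all 5**k candidates; intended as faster (a timing run measured 12.75x
-- at the largest input size on which both versions finished, A timing out beyond that).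

-- ===== PORT A =====
-- chars = ["a", "b", "c", "d", "e"]
def pv_chars : List String := ["a", "b", "c", "d", "e"]

-- int_to_string(k, n): k iterations prepending chars[tmp_n % 5], tmp_n //= 5
def int_to_string (k : Int) (n : Int) : String :=
  ((PySem.List.pyRange 0 k 1).foldl
    (fun (st : String × Int) _ =>
      (PySem.List.pyGetD pv_chars (PySem.Int.mod st.2 5) "" ++ st.1, PySem.Int.floordiv st.2 5))
    ("", n)).1

-- for i in range(5**k): lexical = int_to_string(k, i); for s in lst: if s == lexical: output.append(lexical)
-- (5**k is ported as 5 ^ k.toNat; on k < 0 Python raises TypeError, excluded by Pre_)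
def sort_strings2 (lst : List String) (k : Int) : List String :=
  (PySem.List.pyRange 0 ((5 ^ k.toNat : Nat) : Int) 1).foldl
    (fun output i =>
      let lexical := int_to_string k i
      lst.foldl (fun output s => if s == lexical then output ++ [lexical] else output) output)
    []

-- ===== PORT B =====
-- return sorted(s for s in lst if len(s) == k and all(c in "abcde" for c in s))
-- ('c in "abcde"' for a single char c is membership in the char list of "abcde")
def sort_strings2_alt (lst : List String) (k : Int) : List String :=
  PySem.List.sorted
    (lst.filter (fun s =>
      (PySem.Str.len s == k) && s.toList.all (fun c => ("abcde".toList).contains c)))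
    (fun s => s)

-- ===== PRECONDITION & SPEC =====
-- Pre_ excludes only k < 0, where Python A raises TypeError (range(5**k) receives a float)
def Pre_sort_strings2 (_lst : List String) (k : Int) : Prop := 0 ≤ k
instance (lst : List String) (k : Int) : Decidable (Pre_sort_strings2 lst k) := by
  unfold Pre_sort_strings2; infer_instance

def pvWitness_sort_strings2 : List String × Int := (["ab", "f", "ab", ""], 2)

def Spec_sort_strings2 (lst : List String) (k : Int) (out : List String) : Prop :=
  out = sort_strings2_alt lst k
instance (lst : List String) (k : Int) (out : List String) : Decidable (Spec_sort_strings2 lst k out) := by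
  unfold Spec_sort_strings2; infer_instance

-- ===== CLAIM (what is proved, stated in full; the proofs are below) =====
def Claim_equal_sort_strings2 : Prop := ∀ (lst : List String) (k : Int),
  Dom_sort_strings2 lst k → Pre_sort_strings2 lst k →
  Spec_sort_strings2 lst k (sort_strings2 lst k)

-- ===== LEMMAS AND PROOFS =====

-- the digit character chars[d] and the base-5 digit string of n, most significant first
def pvDchar : Nat → Char
  | 0 => 'a' | 1 => 'b' | 2 => 'c' | 3 => 'd' | _ => 'e'

def pvDigs : Nat → Nat → List Char
  | 0, _ => []
  | k+1, n => pvDigs k (n / 5) ++ [pvDchar (n % 5)]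

def pvStep (st : String × Int) : String × Int :=
  (PySem.List.pyGetD pv_chars (PySem.Int.mod st.2 5) "" ++ st.1, PySem.Int.floordiv st.2 5)

lemma pv_foldl_ignore {α β : Type} (f : β → β) :
    ∀ (l : List α) (st : β), l.foldl (fun st _ => f st) st = f^[l.length] st := by
  intro l
  induction l with
  | nil => intro st; simp
  | cons a t ih => intro st; simp [List.foldl_cons, ih, Function.iterate_succ_apply]

lemma int_to_string_iter (k n : Int) :
    int_to_string k n = (pvStep^[(PySem.List.pyRange 0 k 1).length] ("", n)).1 :=
  congrArg Prod.fst (pv_foldl_ignore pvStep _ _)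

lemma pvDchar_mem (m : Nat) : pvDchar m ∈ ['a', 'b', 'c', 'd', 'e'] := by
  match m with
  | 0 | 1 | 2 | 3 => simp [pvDchar]
  | (n+4) => simp [pvDchar]

lemma pvDchar_lt {a b : Nat} (h : a < b) (hb : b < 5) : pvDchar a < pvDchar b := by
  have ha : a < 4 := by omega
  interval_cases b <;> interval_cases a <;> decide

lemma pvStep_iter (k : Nat) : ∀ (n : Nat) (acc : List Char),
    pvStep^[k] (String.ofList acc, (n : Int)) =
      (String.ofList (pvDigs k n ++ acc), ((n / 5 ^ k : Nat) : Int)) := by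
  induction k with
  | zero => intro n acc; simp [pvDigs]
  | succ k ih =>
    intro n acc
    rw [Function.iterate_succ_apply]
    have h5 : n % 5 < 5 := Nat.mod_lt _ (by norm_num)
    have hm : PySem.Int.mod (n : Int) 5 = ((n % 5 : Nat) : Int) := by
      exact_mod_cast PySem.Int.mod_natCast n 5
    have hf : PySem.Int.floordiv (n : Int) 5 = ((n / 5 : Nat) : Int) := by
      exact_mod_cast PySem.Int.floordiv_natCast n 5
    have hstep : pvStep (String.ofList acc, (n : Int)) =
        (String.ofList (pvDchar (n % 5) :: acc), ((n / 5 : Nat) : Int)) := by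
      unfold pvStep
      rw [hm, hf, PySem.List.pyGetD_natCast]
      refine Prod.ext ?_ rfl
      show pv_chars.getD (n % 5) "" ++ String.ofList acc = String.ofList (pvDchar (n % 5) :: acc)
      have hc : ∀ r, r < 5 → pv_chars.getD r "" = String.ofList [pvDchar r] := by
        intro r hr; interval_cases r <;> rfl
      rw [hc _ h5, ← String.ofList_append]
      rfl
    rw [hstep, ih (n / 5) (pvDchar (n % 5) :: acc)]
    refine Prod.ext ?_ ?_
    · show String.ofList _ = String.ofList _
      congr 1
      show pvDigs k (n / 5) ++ pvDchar (n % 5) :: acc = pvDigs (k + 1) n ++ acc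
      simp [pvDigs, List.append_assoc]
    · show ((n / 5 / 5 ^ k : Nat) : Int) = ((n / 5 ^ (k + 1) : Nat) : Int)
      rw [Nat.div_div_eq_div_mul, ← pow_succ']

lemma int_to_string_digs (K n : Nat) :
    int_to_string (K : Int) (n : Int) = String.ofList (pvDigs K n) := by
  rw [int_to_string_iter]
  have hl : (PySem.List.pyRange 0 (K : Int) 1).length = K := by
    simp [PySem.List.length_pyRange_one]
  rw [hl]
  have h := pvStep_iter K n []
  have : ("" : String) = String.ofList [] := rfl
  rw [this]
  rw [h]
  simp

lemma length_pvDigs (k : Nat) : ∀ n, (pvDigs k n).length = k := by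
  induction k with
  | zero => intro n; simp [pvDigs]
  | succ k ih => intro n; simp [pvDigs, ih]

lemma pvDigs_mem_chars (k : Nat) : ∀ n, ∀ c ∈ pvDigs k n, c ∈ ['a', 'b', 'c', 'd', 'e'] := by
  induction k with
  | zero => intro n c hc; simp [pvDigs] at hc
  | succ k ih =>
    intro n c hc
    simp only [pvDigs, List.mem_append, List.mem_singleton] at hc
    rcases hc with hc | hc
    · exact ih _ _ hc
    · rw [hc]; exact pvDchar_mem _

lemma pvDigs_high (k : Nat) : ∀ n, n < 5 ^ (k + 1) →
    pvDigs (k + 1) n = pvDchar (n / 5 ^ k) :: pvDigs k (n % 5 ^ k) := by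
  induction k with
  | zero =>
    intro n h
    have h5 : n < 5 := by simpa using h
    simp [pvDigs, Nat.mod_eq_of_lt h5]
  | succ k ih =>
    intro n h
    have h5 : n / 5 < 5 ^ (k + 1) := by
      rw [Nat.div_lt_iff_lt_mul (by norm_num)]
      calc n < 5 ^ (k + 2) := h
        _ = 5 ^ (k + 1) * 5 := by ring
    have e1 : pvDigs (k + 2) n = pvDigs (k + 1) (n / 5) ++ [pvDchar (n % 5)] := rfl
    rw [e1, ih _ h5]
    have e2 : pvDigs (k + 1) (n % 5 ^ (k + 1)) =
        pvDigs k (n % 5 ^ (k + 1) / 5) ++ [pvDchar (n % 5 ^ (k + 1) % 5)] := rfl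
    have hd : n / 5 / 5 ^ k = n / 5 ^ (k + 1) := by
      rw [Nat.div_div_eq_div_mul, ← pow_succ']
    have hmd : n % 5 ^ (k + 1) / 5 = n / 5 % 5 ^ k := by
      have h52 : (5 : Nat) ^ (k + 1) = 5 * 5 ^ k := by ring
      rw [h52, Nat.mod_mul_right_div_self]
    have hmm : n % 5 ^ (k + 1) % 5 = n % 5 := by
      apply Nat.mod_mod_of_dvd
      exact dvd_pow_self 5 (by omega)
    rw [e2, hmd, hmm, ← hd]
    simp [List.cons_append]

lemma pvDigs_lex (k : Nat) : ∀ i j, i < j → j < 5 ^ k →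
    List.Lex (· < ·) (pvDigs k i) (pvDigs k j) := by
  induction k with
  | zero => intro i j hij hj; omega
  | succ k ih =>
    intro i j hij hj
    have hi : i < 5 ^ (k + 1) := lt_trans hij hj
    rw [pvDigs_high k i hi, pvDigs_high k j hj]
    have hdle : i / 5 ^ k ≤ j / 5 ^ k := Nat.div_le_div_right (le_of_lt hij)
    have hdj : j / 5 ^ k < 5 := by
      rw [Nat.div_lt_iff_lt_mul (Nat.pow_pos (by norm_num : (0:Nat) < 5))]
      calc j < 5 ^ (k + 1) := hj
        _ = 5 * 5 ^ k := by ring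
    rcases lt_or_eq_of_le hdle with hlt | heq
    · exact List.Lex.rel (pvDchar_lt hlt hdj)
    · have hmod : i % 5 ^ k < j % 5 ^ k := by
        have h1 := Nat.div_add_mod i (5 ^ k)
        have h2 := Nat.div_add_mod j (5 ^ k)
        rw [heq] at h1
        omega
      rw [heq]
      exact List.Lex.cons (ih _ _ hmod (Nat.mod_lt _ (Nat.pow_pos (by norm_num : (0:Nat) < 5))))

lemma pvDigs_surj (k : Nat) : ∀ l : List Char, l.length = k →
    (∀ c ∈ l, c ∈ ['a', 'b', 'c', 'd', 'e']) → ∃ n, n < 5 ^ k ∧ pvDigs k n = l := by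
  induction k with
  | zero =>
    intro l hlen _
    exact ⟨0, by norm_num, by simp [pvDigs, List.eq_nil_of_length_eq_zero hlen]⟩
  | succ k ih =>
    intro l hlen hmem
    match l with
    | c :: rest =>
      obtain ⟨d, hd5, hdc⟩ : ∃ d, d < 5 ∧ pvDchar d = c := by
        have := hmem c (List.mem_cons_self)
        simp only [List.mem_cons, List.not_mem_nil, or_false] at this
        rcases this with h | h | h | h | h
        · exact ⟨0, by norm_num, by rw [h]; rfl⟩
        · exact ⟨1, by norm_num, by rw [h]; rfl⟩
        · exact ⟨2, by norm_num, by rw [h]; rfl⟩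
        · exact ⟨3, by norm_num, by rw [h]; rfl⟩
        · exact ⟨4, by norm_num, by rw [h]; rfl⟩
      obtain ⟨m, hm, hdig⟩ := ih rest (by simpa using hlen)
        (fun c hc => hmem _ (List.mem_cons_of_mem _ hc))
      have hpos : 0 < 5 ^ k := Nat.pow_pos (by norm_num : (0:Nat) < 5)
      refine ⟨d * 5 ^ k + m, ?_, ?_⟩
      · calc d * 5 ^ k + m < d * 5 ^ k + 5 ^ k := by omega
          _ = (d + 1) * 5 ^ k := by ring
          _ ≤ 5 * 5 ^ k := Nat.mul_le_mul_right _ (by omega)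
          _ = 5 ^ (k + 1) := by ring
      · have hb : d * 5 ^ k + m < 5 ^ (k + 1) := by
          calc d * 5 ^ k + m < d * 5 ^ k + 5 ^ k := by omega
            _ = (d + 1) * 5 ^ k := by ring
            _ ≤ 5 * 5 ^ k := Nat.mul_le_mul_right _ (by omega)
            _ = 5 ^ (k + 1) := by ring
        rw [pvDigs_high k _ hb]
        have hdiv : (d * 5 ^ k + m) / 5 ^ k = d := by
          rw [Nat.add_comm, Nat.add_mul_div_right _ _ hpos, Nat.div_eq_of_lt hm]
          omega
        have hmod : (d * 5 ^ k + m) % 5 ^ k = m := by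
          rw [Nat.add_comm, Nat.add_mul_mod_self_right]
          exact Nat.mod_eq_of_lt hm
        rw [hdiv, hmod, hdc, hdig]

-- the m-th valid string, in lexical order
def pvS (K m : Nat) : String := String.ofList (pvDigs K m)

lemma pvS_lt {K m m' : Nat} (h : m < m') (h' : m' < 5 ^ K) : pvS K m < pvS K m' := by
  rw [pvS, pvS, String.lt_iff_toList_lt, String.toList_ofList, String.toList_ofList]
  exact (List.lt_iff_lex_lt _ _).mpr (pvDigs_lex K m m' h h')

lemma pvS_valid (K m : Nat) :
    (pvS K m).toList.length = K ∧ ∀ c ∈ (pvS K m).toList, c ∈ ['a', 'b', 'c', 'd', 'e'] := by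
  rw [pvS, String.toList_ofList]
  exact ⟨length_pvDigs K m, pvDigs_mem_chars K m⟩

-- B's filter predicate, characterised
lemma pv_validB_iff (K : Nat) (x : String) :
    ((PySem.Str.len x == (K : Int)) && x.toList.all (fun c => ("abcde".toList).contains c)) = true ↔
      x.toList.length = K ∧ ∀ c ∈ x.toList, c ∈ ['a', 'b', 'c', 'd', 'e'] := by
  rw [Bool.and_eq_true, beq_iff_eq, PySem.Str.len_eq, List.all_eq_true]
  constructor
  · rintro ⟨h1, h2⟩
    refine ⟨by exact_mod_cast h1, fun c hc => ?_⟩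
    have := h2 c hc
    simpa using this
  · rintro ⟨h1, h2⟩
    refine ⟨by exact_mod_cast h1, fun c hc => ?_⟩
    have := h2 c hc
    simpa using this

lemma pv_count_flatMap {α : Type} [BEq α] (x : α) (f : Nat → List α) (l : List Nat) :
    (l.flatMap f).count x = (l.map (fun m => (f m).count x)).sum := by
  induction l with
  | nil => simp
  | cons a t ih => simp [List.count_append, ih]

lemma pv_map_const_filter (t : String) (l : List String) :
    (l.filter (fun s => s == t)).map (fun _ => t) = l.filter (fun s => s == t) := by
  induction l with
  | nil => simp
  | cons a l ih =>
    by_cases h : a == t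
    · have : a = t := eq_of_beq h
      simp [ih, this]
    · simp only [List.filter_cons, h]
      exact ih

-- core equivalence for a natural k
lemma pv_foldl_congr {α β : Type} (l : List α) (f g : β → α → β) (i : β)
    (h : ∀ b a, f b a = g b a) : l.foldl f i = l.foldl g i := by
  have hfg : f = g := funext fun b => funext fun a => h b a
  rw [hfg]

lemma pv_main (lst : List String) (K : Nat) :
    sort_strings2 lst (K : Int) = sort_strings2_alt lst (K : Int) := by
  -- normalise A to a flatMap of filters over List.range (5 ^ K)
  have hA : sort_strings2 lst (K : Int) =
      (List.range (5 ^ K)).flatMap (fun m => lst.filter (fun s => s == pvS K m)) := by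
    unfold sort_strings2
    rw [show ((K : Int)).toNat = K from Int.toNat_natCast K, PySem.List.pyRange_one]
    simp only [sub_zero, Int.toNat_natCast, List.foldl_map]
    rw [pv_foldl_congr (List.range (5 ^ K)) _
      (fun (output : List String) (m : Nat) => output ++
        (lst.filter (fun s => s == int_to_string (K : Int) (0 + (m : Int)))).map
          (fun _ => int_to_string (K : Int) (0 + (m : Int)))) []
      (fun out m => PySem.List.foldl_append_if
        (fun s => s == int_to_string (K : Int) (0 + (m : Int)))
        (fun _ => int_to_string (K : Int) (0 + (m : Int))) lst out)]
    rw [PySem.List.foldl_append_eq_flatMap]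
    rw [List.nil_append]
    apply List.flatMap_congr
    intro m _
    have hz : (0 : Int) + (m : Int) = (m : Int) := by ring
    rw [hz, int_to_string_digs K m]
    simp only [pvS]
    exact pv_map_const_filter _ lst
  rw [hA]
  -- B = sorted of the filtered list; identify it with A's value
  unfold sort_strings2_alt
  symm
  apply PySem.List.sorted_id_eq_of_perm_of_pairwise
  · -- permutation, by counting each string
    rw [List.perm_iff_count]
    intro x
    have hterm : ∀ m, (lst.filter (fun s => s == pvS K m)).count x =
        if x = pvS K m then lst.count x else 0 := by
      intro m
      by_cases h : x = pvS K m
      · rw [if_pos h, List.count_filter (by simp [h])]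
      · rw [if_neg h, List.count_eq_zero]
        intro hx
        rcases List.mem_filter.mp hx with ⟨_, hb⟩
        exact h (eq_of_beq hb)
    have hsum : ((List.range (5 ^ K)).map
        (fun m => (lst.filter (fun s => s == pvS K m)).count x)).sum
        = ∑ m ∈ Finset.range (5 ^ K), (lst.filter (fun s => s == pvS K m)).count x := rfl
    rw [pv_count_flatMap, hsum, Finset.sum_congr rfl (fun m _ => hterm m)]
    by_cases hv : ((PySem.Str.len x == (K : Int)) &&
        x.toList.all (fun c => ("abcde".toList).contains c)) = true
    · -- x is valid: exactly one index m0 produces it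
      obtain ⟨hlen, hmem⟩ := (pv_validB_iff K x).mp hv
      obtain ⟨m0, hm0, hdig⟩ := pvDigs_surj K x.toList hlen hmem
      have hx0 : x = pvS K m0 := by
        simp only [pvS]
        rw [hdig, String.ofList_toList]
      have hside : ∀ m ∈ Finset.range (5 ^ K), m ≠ m0 →
          (if x = pvS K m then lst.count x else 0) = 0 := by
        intro m hm hne
        rw [if_neg]
        intro hx
        have h1 : pvS K m = pvS K m0 := hx.symm.trans hx0
        rcases lt_or_gt_of_ne hne with h | h
        · exact absurd h1 (ne_of_lt (pvS_lt h hm0))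
        · exact absurd h1 (ne_of_gt (pvS_lt h (Finset.mem_range.mp hm)))
      rw [Finset.sum_eq_single_of_mem m0 (Finset.mem_range.mpr hm0) hside, if_pos hx0]
      exact (List.count_filter
        (p := fun s => (PySem.Str.len s == (K : Int)) &&
          s.toList.all (fun c => ("abcde".toList).contains c)) (a := x) (l := lst) hv).symm
    · -- x is invalid: no index produces it, and the filter drops it
      have hz : ∀ m ∈ Finset.range (5 ^ K),
          (if x = pvS K m then lst.count x else 0) = 0 := by
        intro m _
        rw [if_neg]
        intro hx
        apply hv
        apply (pv_validB_iff K x).mpr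
        rw [hx]
        exact pvS_valid K m
      rw [Finset.sum_eq_zero hz, eq_comm, List.count_eq_zero]
      intro hx
      exact hv (List.mem_filter.mp hx).2
  · -- sortedness: blocks of equal strings, strictly increasing across blocks
    rw [List.flatMap_def, List.pairwise_flatten]
    constructor
    · intro l hl
      rcases List.mem_map.mp hl with ⟨m, _, rfl⟩
      apply List.pairwise_of_forall_mem_list
      intro a ha b hb
      have ha' := eq_of_beq (List.mem_filter.mp ha).2
      have hb' := eq_of_beq (List.mem_filter.mp hb).2
      rw [ha', hb']
    · rw [List.pairwise_map, List.pairwise_iff_getElem]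
      intro i j hi hj hij a ha b hb
      simp only [List.getElem_range] at ha hb
      have ha' := eq_of_beq (List.mem_filter.mp ha).2
      have hb' := eq_of_beq (List.mem_filter.mp hb).2
      rw [ha', hb']
      exact le_of_lt (pvS_lt hij (by simpa using hj))

-- ===== VERDICT (by name: the statement is the Claim_ definition above) =====
theorem sort_strings2_spec : Claim_equal_sort_strings2 := by
  intro lst k _ hpre
  unfold Spec_sort_strings2
  have hk : k = ((k.toNat : Nat) : Int) := (Int.toNat_of_nonneg hpre).symm
  rw [hk]
  exact pv_main lst k.toNat
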